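-- pv_equiv track=rewrite | github.com/yacsoum/salt | salt/utils/templates.py | _get_jinja_error_line
-- ===== SOURCE A (Python) =====
-- def _get_jinja_error_line(tb_data):
--     '''
--     Return the line number where the template error was found
--     '''
--     try:
--         return [
--             x[1] for x in tb_data if x[2] in ('top-level template code',
--                                               'template')
--         ][-1]
--     except IndexError:
--         pass
--     return None
-- ===== SOURCE B (Python) =====
-- def _get_jinja_error_line(tb_data):
--     '''
--     Return the line number where the template error was found
--     '''
--     for x in reversed(tb_data):
--         if x[2] in ('top-level template code', 'template'):
--             return x[1]
--     return None
-- ===== Notes on version B (the rewrite author's own statement) =====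
-- stated objective: simpler
-- what changed: Replaces building the full filtered list and taking [-1] under a try/except IndexError with a reverse scan that returns the first match early (and None after the loop).
import Mathlib
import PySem

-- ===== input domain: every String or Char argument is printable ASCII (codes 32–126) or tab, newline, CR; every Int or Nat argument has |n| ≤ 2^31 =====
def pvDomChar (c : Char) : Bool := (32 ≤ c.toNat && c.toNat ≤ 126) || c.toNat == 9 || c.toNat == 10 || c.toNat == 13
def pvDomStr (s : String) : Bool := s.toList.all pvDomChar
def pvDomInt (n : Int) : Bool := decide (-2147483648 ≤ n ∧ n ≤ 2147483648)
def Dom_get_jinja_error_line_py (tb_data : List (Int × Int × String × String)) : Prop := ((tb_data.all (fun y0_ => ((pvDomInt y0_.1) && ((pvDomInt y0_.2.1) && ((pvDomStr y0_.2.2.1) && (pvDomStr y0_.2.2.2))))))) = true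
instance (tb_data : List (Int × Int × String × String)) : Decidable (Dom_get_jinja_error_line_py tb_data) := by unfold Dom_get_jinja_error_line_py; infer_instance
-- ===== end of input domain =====

-- B replaces A's build-filtered-list-then-take-[-1]-with-except-IndexError by a reverse scan with early return (simpler).


-- x[2] in ('top-level template code', 'template')
def pvTplMatch (x : Int × Int × String × String) : Bool :=
  x.2.2.1 == "top-level template code" || x.2.2.1 == "template"

-- ===== PORT A =====
-- A builds the comprehension [x[1] for x in tb_data if …] and takes [-1];
-- IndexError on the empty list is the none branch of getLast?.
def get_jinja_error_line_py (tb_data : List (Int × Int × String × String)) : Option Int :=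
  match ((tb_data.filter pvTplMatch).map (fun x => x.2.1)).getLast? with
  | some v => some v
  | none => none

-- ===== PORT B =====
-- B scans reversed(tb_data) and returns x[1] at the first match, else None.
def pvRevScan : List (Int × Int × String × String) → Option Int
  | [] => none
  | x :: rest => if pvTplMatch x then some x.2.1 else pvRevScan rest

def get_jinja_error_line_py_alt (tb_data : List (Int × Int × String × String)) : Option Int :=
  pvRevScan tb_data.reverse

-- ===== PRECONDITION & SPEC =====
def Spec_get_jinja_error_line_py (tb_data : List (Int × Int × String × String)) (out : Option Int) : Prop := out = get_jinja_error_line_py_alt tb_data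
instance (tb_data : List (Int × Int × String × String)) (out : Option Int) : Decidable (Spec_get_jinja_error_line_py tb_data out) := by unfold Spec_get_jinja_error_line_py; infer_instance

-- ===== CLAIM (what is proved, stated in full; the proofs are below) =====
def Claim_equal_get_jinja_error_line_py : Prop := ∀ (tb_data : List (Int × Int × String × String)), Dom_get_jinja_error_line_py tb_data → Spec_get_jinja_error_line_py tb_data (get_jinja_error_line_py tb_data)

-- ===== LEMMAS AND PROOFS =====
theorem pvRevScan_eq_find? (l : List (Int × Int × String × String)) :
    pvRevScan l = (l.find? pvTplMatch).map (fun x => x.2.1) := by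
  induction l with
  | nil => rfl
  | cons x rest ih =>
    simp only [pvRevScan, List.find?]
    cases h : pvTplMatch x <;> simp [ih]

theorem head?_filter_map (l : List (Int × Int × String × String)) :
    ((l.filter pvTplMatch).map (fun x => x.2.1)).head? = (l.find? pvTplMatch).map (fun x => x.2.1) := by
  induction l with
  | nil => rfl
  | cons x rest ih =>
    simp only [List.filter, List.find?]
    cases h : pvTplMatch x <;> simp [ih]

theorem get_jinja_error_line_py_spec : Claim_equal_get_jinja_error_line_py := by
  intro tb_data _
  unfold Spec_get_jinja_error_line_py get_jinja_error_line_py get_jinja_error_line_py_alt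
  rw [pvRevScan_eq_find?, ← head?_filter_map, List.getLast?_eq_head?_reverse,
    ← List.map_reverse, ← List.filter_reverse]
  cases (((tb_data.reverse.filter pvTplMatch).map (fun x => x.2.1))).head? <;> rfl
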